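-- pv_equiv track=rewrite | github.com/bug-rankin/ereno-ian | strip_comments.py | strip_java_comments
-- ===== SOURCE A (Python) =====
-- def strip_java_comments(src: str) -> str:
--     out = []
--     i = 0
--     n = len(src)
--     while i < n:
--         c = src[i]
--         nxt = src[i + 1] if i + 1 < n else ''
--         # String literal
--         if c == '"':
--             out.append(c)
--             i += 1
--             while i < n:
--                 ch = src[i]
--                 out.append(ch)
--                 if ch == '\\' and i + 1 < n:
--                     out.append(src[i + 1])
--                     i += 2
--                     continue
--                 if ch == '"':
--                     i += 1
--                     break
--                 i += 1
--             continue
--         # Char literal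
--         if c == "'":
--             out.append(c)
--             i += 1
--             while i < n:
--                 ch = src[i]
--                 out.append(ch)
--                 if ch == '\\' and i + 1 < n:
--                     out.append(src[i + 1])
--                     i += 2
--                     continue
--                 if ch == "'":
--                     i += 1
--                     break
--                 i += 1
--             continue
--         # Line comment
--         if c == '/' and nxt == '/':
--             while i < n and src[i] != '\n':
--                 i += 1
--             continue
--         # Block comment
--         if c == '/' and nxt == '*':
--             i += 2
--             while i < n - 1 and not (src[i] == '*' and src[i + 1] == '/'):
--                 i += 1
--             i += 2  # skip */
--             continue
--         out.append(c)
--         i += 1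
--     return ''.join(out)
-- ===== SOURCE B (Python) =====
-- def strip_java_comments(src: str) -> str:
--     # Single-pass finite-state machine over the characters.
--     NORMAL, SLASH, STR, STR_ESC, CHR, CHR_ESC, LINE, BLK, BLK_STAR = range(9)
--     out = []
--     state = NORMAL
--     for c in src:
--         while True:
--             if state == NORMAL:
--                 if c == '/':
--                     state = SLASH
--                 elif c == '"':
--                     out.append(c); state = STR
--                 elif c == "'":
--                     out.append(c); state = CHR
--                 else:
--                     out.append(c)
--             elif state == SLASH:
--                 if c == '/':
--                     state = LINE
--                 elif c == '*':
--                     state = BLK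
--                 else:
--                     out.append('/'); state = NORMAL
--                     continue  # reprocess c in NORMAL
--             elif state == STR:
--                 out.append(c)
--                 if c == '\\':
--                     state = STR_ESC
--                 elif c == '"':
--                     state = NORMAL
--             elif state == STR_ESC:
--                 out.append(c); state = STR
--             elif state == CHR:
--                 out.append(c)
--                 if c == '\\':
--                     state = CHR_ESC
--                 elif c == "'":
--                     state = NORMAL
--             elif state == CHR_ESC:
--                 out.append(c); state = CHR
--             elif state == LINE:
--                 if c == '\n':
--                     out.append(c); state = NORMAL
--             elif state == BLK:
--                 if c == '*':
--                     state = BLK_STAR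
--             else:  # BLK_STAR
--                 if c == '/':
--                     state = NORMAL
--                 elif c != '*':
--                     state = BLK
--             break
--     if state == SLASH:
--         out.append('/')
--     return ''.join(out)
-- ===== Notes on version B (the rewrite author's own statement) =====
-- stated objective: alternative
-- what changed: Replaces A's index-based scanner with nested inner while-loops for string/char literals and comments by a single explicit finite-state machine (9 states, one transition per character) that flushes a pending slash at EOF.
import Mathlib
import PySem

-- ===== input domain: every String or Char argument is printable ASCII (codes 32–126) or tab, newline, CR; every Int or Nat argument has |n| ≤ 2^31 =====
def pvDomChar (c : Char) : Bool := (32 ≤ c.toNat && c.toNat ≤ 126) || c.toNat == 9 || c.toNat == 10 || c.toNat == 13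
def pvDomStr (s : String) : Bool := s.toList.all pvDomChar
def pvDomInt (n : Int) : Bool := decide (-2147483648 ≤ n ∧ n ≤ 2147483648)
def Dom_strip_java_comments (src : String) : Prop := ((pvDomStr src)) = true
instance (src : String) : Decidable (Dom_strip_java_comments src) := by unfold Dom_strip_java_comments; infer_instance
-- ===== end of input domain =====

-- B replaces A's index-driven scanner with nested literal/comment sub-loops by a single
-- one-character-at-a-time finite-state machine (alternative decomposition, same cost).

-- ===== PORT A =====
-- A's index loop is transcribed over the remaining suffix of the character list:
-- aMain = the outer while, aStr = the string/char-literal inner loop (q is the quote),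
-- aLine = the line-comment skip, aBlock = the block-comment skip.
mutual
def aMain : List Char → List Char
  | [] => []
  | c :: rest =>
    if c = '"' then '"' :: aStr '"' rest
    else if c = '\'' then '\'' :: aStr '\'' rest
    -- line comment: A's skip loop starts at this '/', which is ≠ '\n', so it skips it
    else if c = '/' ∧ rest.head? = some '/' then aLine rest
    -- block comment: i += 2 drops the '/' and the '*'
    else if c = '/' ∧ rest.head? = some '*' then aBlock rest.tail
    else c :: aMain rest
termination_by l => l.length
decreasing_by all_goals simp_wf

def aStr (q : Char) : List Char → List Char
  | [] => []
  | '\\' :: d :: rest => '\\' :: d :: aStr q rest   -- escape: append both, i += 2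
  | ch :: rest => ch :: (if ch = q then aMain rest else aStr q rest)
termination_by l => l.length
decreasing_by all_goals simp_wf

def aLine : List Char → List Char
  | [] => []
  -- A's skip loop stops at '\n'; the outer loop then emits it (it matches no branch)
  | '\n' :: rest => '\n' :: aMain rest
  | _ :: rest => aLine rest
termination_by l => l.length
decreasing_by all_goals simp_wf

def aBlock : List Char → List Char
  | '*' :: '/' :: rest => aMain rest                -- closing "*/", i += 2
  | _ :: y :: rest => aBlock (y :: rest)
  | _ => []                                         -- i ≥ n-1: loop ends, i += 2 overshoots
termination_by l => l.length
decreasing_by all_goals simp_wf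
end

def strip_java_comments (src : String) : String := String.ofList (aMain src.toList)

-- ===== PORT B =====
inductive FsmSt
  | norm | slash | str | strEsc | chr | chrEsc | line | blk | blkStar
deriving DecidableEq, Repr

def fsmRank : FsmSt → Nat
  | .slash => 1
  | _ => 0

-- B's for-loop with a state variable; the SLASH 'continue' (reprocess) is the
-- recursive call that keeps the same character list.
def fsmB : FsmSt → List Char → List Char
  | .slash, [] => ['/']                             -- final flush of a pending '/'
  | _, [] => []
  | .norm, c :: rest =>
    if c = '/' then fsmB .slash rest
    else if c = '"' then c :: fsmB .str rest
    else if c = '\'' then c :: fsmB .chr rest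
    else c :: fsmB .norm rest
  | .slash, c :: rest =>
    if c = '/' then fsmB .line rest
    else if c = '*' then fsmB .blk rest
    else '/' :: fsmB .norm (c :: rest)
  | .str, c :: rest =>
    c :: (if c = '\\' then fsmB .strEsc rest
          else if c = '"' then fsmB .norm rest
          else fsmB .str rest)
  | .strEsc, c :: rest => c :: fsmB .str rest
  | .chr, c :: rest =>
    c :: (if c = '\\' then fsmB .chrEsc rest
          else if c = '\'' then fsmB .norm rest
          else fsmB .chr rest)
  | .chrEsc, c :: rest => c :: fsmB .chr rest
  | .line, c :: rest => if c = '\n' then c :: fsmB .norm rest else fsmB .line rest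
  | .blk, c :: rest => if c = '*' then fsmB .blkStar rest else fsmB .blk rest
  | .blkStar, c :: rest =>
    if c = '/' then fsmB .norm rest
    else if c = '*' then fsmB .blkStar rest
    else fsmB .blk rest
termination_by st l => 2 * l.length + fsmRank st
decreasing_by all_goals simp_wf <;> simp [fsmRank] <;> omega

def strip_java_comments_alt (src : String) : String := String.ofList (fsmB .norm src.toList)

-- ===== PRECONDITION & SPEC =====
def Spec_strip_java_comments (src : String) (out : String) : Prop := out = strip_java_comments_alt src
instance (src : String) (out : String) : Decidable (Spec_strip_java_comments src out) := by unfold Spec_strip_java_comments; infer_instance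

-- ===== CLAIM (what is proved, stated in full; the proofs are below) =====
def Claim_equal_strip_java_comments : Prop := ∀ (src : String), Dom_strip_java_comments src → Spec_strip_java_comments src (strip_java_comments src)

-- ===== LEMMAS AND PROOFS =====

theorem aBlock_cons_ne_star {c : Char} (h : c ≠ '*') (r : List Char) :
    aBlock (c :: r) = aBlock r := by
  match r with
  | [] => simp [aBlock]
  | y :: rr => simp [aBlock, h]

theorem fsm_eq_a : ∀ (n : Nat) (l : List Char), l.length ≤ n →
    (fsmB .norm l = aMain l)
  ∧ (fsmB .str l = aStr '\"' l)
  ∧ (fsmB .chr l = aStr '\'' l)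
  ∧ (fsmB .strEsc l = (match l with | [] => [] | d :: r => d :: aStr '\"' r))
  ∧ (fsmB .chrEsc l = (match l with | [] => [] | d :: r => d :: aStr '\'' r))
  ∧ (fsmB .line l = aLine l)
  ∧ (fsmB .blk l = aBlock l)
  ∧ (fsmB .blkStar l = aBlock ('*' :: l))
  ∧ (fsmB .slash l = aMain ('/' :: l)) := by
  intro n
  induction n with
  | zero =>
    intro l hl
    have hnil : l = [] := List.eq_nil_of_length_eq_zero (Nat.le_zero.mp hl)
    subst hnil
    refine ⟨?_, ?_, ?_, ?_, ?_, ?_, ?_, ?_, ?_⟩ <;> simp [fsmB, aMain, aStr, aLine, aBlock]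
  | succ n ih =>
    intro l hl
    match l with
    | [] => refine ⟨?_, ?_, ?_, ?_, ?_, ?_, ?_, ?_, ?_⟩ <;> simp [fsmB, aMain, aStr, aLine, aBlock]
    | c :: r =>
      have hr : r.length ≤ n := by simp at hl; omega
      have hnorm : fsmB .norm (c :: r) = aMain (c :: r) := by
        by_cases h1 : c = '/'
        · subst h1
          simp [fsmB, (ih r hr).2.2.2.2.2.2.2.2]
        · by_cases h2 : c = '\"'
          · subst h2; simp [fsmB, aMain, (ih r hr).2.1]
          · by_cases h3 : c = '\''
            · subst h3; simp [fsmB, aMain, (ih r hr).2.2.1]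
            · simp [fsmB, aMain, h1, h2, h3, (ih r hr).1]
      have hstr : fsmB .str (c :: r) = aStr '\"' (c :: r) := by
        by_cases h1 : c = '\\'
        · subst h1
          match r with
          | [] => simp [fsmB, aStr]
          | d :: rr => simp [fsmB, aStr, (ih (d :: rr) hr).2.2.2.1]
        · by_cases h2 : c = '\"'
          · subst h2; simp [fsmB, aStr, (ih r hr).1]
          · simp [fsmB, aStr, h1, h2, (ih r hr).2.1]
      have hchr : fsmB .chr (c :: r) = aStr '\'' (c :: r) := by
        by_cases h1 : c = '\\'
        · subst h1
          match r with
          | [] => simp [fsmB, aStr]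
          | d :: rr => simp [fsmB, aStr, (ih (d :: rr) hr).2.2.2.2.1]
        · by_cases h2 : c = '\''
          · subst h2; simp [fsmB, aStr, (ih r hr).1]
          · simp [fsmB, aStr, h1, h2, (ih r hr).2.2.1]
      have hesc : fsmB .strEsc (c :: r) = c :: aStr '\"' r := by
        simp [fsmB, (ih r hr).2.1]
      have hcesc : fsmB .chrEsc (c :: r) = c :: aStr '\'' r := by
        simp [fsmB, (ih r hr).2.2.1]
      have hline : fsmB .line (c :: r) = aLine (c :: r) := by
        by_cases h1 : c = '\n'
        · subst h1; simp [fsmB, aLine, (ih r hr).1]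
        · simp [fsmB, aLine, h1, (ih r hr).2.2.2.2.2.1]
      have hblk : fsmB .blk (c :: r) = aBlock (c :: r) := by
        by_cases h1 : c = '*'
        · subst h1; simp [fsmB, (ih r hr).2.2.2.2.2.2.2.1]
        · simp [fsmB, h1, aBlock_cons_ne_star h1, (ih r hr).2.2.2.2.2.2.1]
      have hblkStar : fsmB .blkStar (c :: r) = aBlock ('*' :: c :: r) := by
        by_cases h1 : c = '/'
        · subst h1; simp [fsmB, aBlock, (ih r hr).1]
        · by_cases h2 : c = '*'
          · subst h2; simp [fsmB, aBlock, (ih r hr).2.2.2.2.2.2.2.1]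
          · have : aBlock ('*' :: c :: r) = aBlock (c :: r) := by simp [aBlock, h1]
            rw [this, aBlock_cons_ne_star h2]
            simp [fsmB, h1, h2, (ih r hr).2.2.2.2.2.2.1]
      have hslash : fsmB .slash (c :: r) = aMain ('/' :: c :: r) := by
        by_cases h1 : c = '/'
        · subst h1
          have : aLine ('/' :: r) = aLine r := by simp [aLine]
          simp [fsmB, aMain, this, (ih r hr).2.2.2.2.2.1]
        · by_cases h2 : c = '*'
          · subst h2; simp [fsmB, aMain, (ih r hr).2.2.2.2.2.2.1]
          · simp [fsmB, aMain, h1, h2, hnorm]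
      exact ⟨hnorm, hstr, hchr, hesc, hcesc, hline, hblk, hblkStar, hslash⟩

-- ===== VERDICT (by name: the statement is the Claim_ definition above) =====
theorem strip_java_comments_spec : Claim_equal_strip_java_comments := by
  intro src _
  unfold Spec_strip_java_comments strip_java_comments strip_java_comments_alt
  rw [(fsm_eq_a src.toList.length src.toList le_rfl).1]
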